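-- pv_equiv track=rewrite | github.com/D1SCURSE/vtornik | вторник задание/2,5/задание 1.py | is_product_of_two
-- ===== SOURCE A (Python) =====
-- def is_product_of_two(numbers, target):
--     seen = set(numbers)
--     for num in seen:
--         if num != 0 and target % num == 0:
--             complementary = target // num
--             if complementary in seen and complementary != num:
--                 return True
--     return False
-- ===== SOURCE B (Python) =====
-- def is_product_of_two(numbers, target):
--     vals = list(set(numbers))
--     for i, a in enumerate(vals):
--         for b in vals[i + 1:]:
--             if a * b == target:
--                 return True
--     return False
-- ===== Notes on version B (the rewrite author's own statement) =====
-- stated objective: alternative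
-- what changed: Replaces the O(n) complement-lookup via divisibility and floor division with a direct pairwise scan over all unordered pairs of distinct values, testing a*b == target by multiplication.
import Mathlib
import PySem

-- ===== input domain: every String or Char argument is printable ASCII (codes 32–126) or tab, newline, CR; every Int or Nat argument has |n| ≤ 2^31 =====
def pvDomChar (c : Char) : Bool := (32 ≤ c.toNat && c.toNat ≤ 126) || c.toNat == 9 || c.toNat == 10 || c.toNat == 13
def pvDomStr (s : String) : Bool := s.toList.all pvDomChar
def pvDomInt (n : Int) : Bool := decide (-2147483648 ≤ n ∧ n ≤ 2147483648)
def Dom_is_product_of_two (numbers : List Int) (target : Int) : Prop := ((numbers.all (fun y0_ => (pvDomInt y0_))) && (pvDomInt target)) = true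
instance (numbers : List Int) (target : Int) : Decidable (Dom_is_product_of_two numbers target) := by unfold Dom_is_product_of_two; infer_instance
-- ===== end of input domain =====

-- B replaces A's complement-lookup (divisibility + floor division) by a pairwise scan over all
-- unordered pairs of distinct values; alternative decomposition, same return value.


-- ===== PORT A =====
-- 'for num in seen: …return True…' — the loop over the set; the returned Bool is
-- order-independent (an existential over the set), so iterating in ofList order is exact.
def isProdLoopA (seen : PySem.Set Int) (target : Int) : List Int → Bool
  | [] => false
  | num :: rest =>
    if num ≠ 0 && PySem.Int.mod target num == 0 then
      let complementary := PySem.Int.floordiv target num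
      if PySem.Set.contains seen complementary && complementary ≠ num then true
      else isProdLoopA seen target rest
    else isProdLoopA seen target rest

def is_product_of_two (numbers : List Int) (target : Int) : Bool :=
  let seen := PySem.Set.ofList numbers
  isProdLoopA seen target seen

-- ===== PORT B =====
-- outer loop: a = vals[i], inner loop over vals[i+1:] — i.e. recursion over the tails.
def isProdLoopB (target : Int) : List Int → Bool
  | [] => false
  | a :: rest =>
    if rest.any (fun b => a * b == target) then true
    else isProdLoopB target rest

def is_product_of_two_alt (numbers : List Int) (target : Int) : Bool :=
  let vals := PySem.Set.ofList numbers
  isProdLoopB target vals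

-- ===== PRECONDITION & SPEC =====
def Spec_is_product_of_two (numbers : List Int) (target : Int) (out : Bool) : Prop := out = is_product_of_two_alt numbers target
instance (numbers : List Int) (target : Int) (out : Bool) : Decidable (Spec_is_product_of_two numbers target out) := by unfold Spec_is_product_of_two; infer_instance

-- ===== CLAIM (what is proved, stated in full; the proofs are below) =====
def Claim_equal_is_product_of_two : Prop := ∀ (numbers : List Int) (target : Int), Dom_is_product_of_two numbers target → Spec_is_product_of_two numbers target (is_product_of_two numbers target)

-- ===== LEMMAS AND PROOFS =====

theorem isProdLoopA_iff (seen : PySem.Set Int) (target : Int) (l : List Int) :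
    isProdLoopA seen target l = true ↔
      ∃ num ∈ l, num ≠ 0 ∧ PySem.Int.mod target num = 0 ∧
        PySem.Int.floordiv target num ∈ seen ∧ PySem.Int.floordiv target num ≠ num := by
  induction l with
  | nil => simp [isProdLoopA]
  | cons num rest ih =>
    rw [show (∃ m ∈ num :: rest, m ≠ 0 ∧ PySem.Int.mod target m = 0 ∧
        PySem.Int.floordiv target m ∈ seen ∧ PySem.Int.floordiv target m ≠ m) ↔
        ((num ≠ 0 ∧ PySem.Int.mod target num = 0 ∧
          PySem.Int.floordiv target num ∈ seen ∧ PySem.Int.floordiv target num ≠ num) ∨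
         (∃ m ∈ rest, m ≠ 0 ∧ PySem.Int.mod target m = 0 ∧
          PySem.Int.floordiv target m ∈ seen ∧ PySem.Int.floordiv target m ≠ m))
      from List.exists_mem_cons_iff _ _ _]
    simp only [isProdLoopA]
    by_cases hc1 : (decide (num ≠ 0) && (PySem.Int.mod target num == 0)) = true
    · rw [if_pos hc1]
      simp only [Bool.and_eq_true, decide_eq_true_eq, beq_iff_eq] at hc1
      by_cases hc2 : (PySem.Set.contains seen (PySem.Int.floordiv target num) &&
          decide (PySem.Int.floordiv target num ≠ num)) = true
      · rw [if_pos hc2]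
        simp only [Bool.and_eq_true, decide_eq_true_eq, PySem.Set.contains_iff] at hc2
        exact iff_of_true rfl (Or.inl ⟨hc1.1, hc1.2, hc2.1, hc2.2⟩)
      · rw [if_neg hc2, ih]
        simp only [Bool.and_eq_true, decide_eq_true_eq, PySem.Set.contains_iff,
          not_and_or] at hc2
        constructor
        · intro h; exact Or.inr h
        · rintro (⟨_, _, hmem, hne⟩ | h)
          · rcases hc2 with hc | hc
            · exact absurd hmem hc
            · exact absurd hne hc
          · exact h
    · rw [if_neg hc1, ih]
      simp only [Bool.and_eq_true, decide_eq_true_eq, beq_iff_eq, not_and_or] at hc1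
      constructor
      · intro h; exact Or.inr h
      · rintro (⟨h0, hmod, _, _⟩ | h)
        · rcases hc1 with hc | hc
          · exact absurd h0 hc
          · exact absurd hmod hc
        · exact h

theorem isProdLoopB_iff (target : Int) (l : List Int) (hnd : l.Nodup) :
    isProdLoopB target l = true ↔ ∃ a ∈ l, ∃ b ∈ l, a ≠ b ∧ a * b = target := by
  induction l with
  | nil => simp [isProdLoopB]
  | cons a rest ih =>
    have hna : a ∉ rest := (List.nodup_cons.mp hnd).1
    have ihr := ih (List.nodup_cons.mp hnd).2
    simp only [isProdLoopB]
    by_cases h : rest.any (fun b => a * b == target) = true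
    · rw [if_pos h]
      obtain ⟨b, hb, hab⟩ := List.any_eq_true.mp h
      have hab' : a * b = target := by simpa using hab
      exact iff_of_true rfl ⟨a, List.mem_cons_self, b, List.mem_cons_of_mem _ hb,
        fun hc => hna (hc ▸ hb), hab'⟩
    · rw [if_neg h, ihr]
      constructor
      · rintro ⟨x, hx, y, hy, hxy, hprod⟩
        exact ⟨x, List.mem_cons_of_mem _ hx, y, List.mem_cons_of_mem _ hy, hxy, hprod⟩
      · rintro ⟨x, hx, y, hy, hxy, hprod⟩
        rcases List.mem_cons.mp hx with rfl | hx'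
        · rcases List.mem_cons.mp hy with rfl | hy'
          · exact absurd rfl hxy
          · exact absurd (List.any_eq_true.mpr ⟨y, hy', by simpa using hprod⟩) h
        · rcases List.mem_cons.mp hy with rfl | hy'
          · exact absurd (List.any_eq_true.mpr
              ⟨x, hx', by simpa [mul_comm] using hprod⟩) h
          · exact ⟨x, hx', y, hy', hxy, hprod⟩

-- the mathematical bridge: divisibility + complement lookup ↔ existence of a distinct pair
theorem exists_pair_iff (s : PySem.Set Int) (target : Int) :
    (∃ num ∈ s, num ≠ 0 ∧ PySem.Int.mod target num = 0 ∧
        PySem.Int.floordiv target num ∈ s ∧ PySem.Int.floordiv target num ≠ num) ↔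
    (∃ a ∈ s, ∃ b ∈ s, a ≠ b ∧ a * b = target) := by
  constructor
  · rintro ⟨num, hnum, h0, hmod, hmem, hne⟩
    refine ⟨num, hnum, PySem.Int.floordiv target num, hmem, fun hc => hne hc.symm, ?_⟩
    have h := PySem.Int.floordiv_mul_add_mod target num
    rw [hmod, add_zero] at h
    linarith [h, mul_comm num (PySem.Int.floordiv target num)]
  · rintro ⟨a, ha, b, hb, hab, hprod⟩
    by_cases ha0 : a = 0
    · subst ha0
      have hb0 : b ≠ 0 := fun h => hab h.symm
      have ht : target = 0 := by simpa using hprod.symm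
      subst ht
      have h := PySem.Int.floordiv_mul_add_mod 0 b
      rw [(PySem.Int.mod_eq_zero_iff_dvd 0 b).mpr (dvd_zero b), add_zero] at h
      have hfd : PySem.Int.floordiv 0 b = 0 := by
        rcases mul_eq_zero.mp h with h' | h'
        · exact h'
        · exact absurd h' hb0
      exact ⟨b, hb, hb0, (PySem.Int.mod_eq_zero_iff_dvd 0 b).mpr (dvd_zero b),
        hfd ▸ ha, hfd ▸ hb0.symm⟩
    · have hdvd : a ∣ target := ⟨b, hprod.symm⟩
      have hmod : PySem.Int.mod target a = 0 := (PySem.Int.mod_eq_zero_iff_dvd target a).mpr hdvd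
      have h := PySem.Int.floordiv_mul_add_mod target a
      rw [hmod, add_zero] at h
      have hfd : PySem.Int.floordiv target a = b := by
        have : PySem.Int.floordiv target a * a = b * a := by rw [h, ← hprod]; ring
        exact mul_right_cancel₀ ha0 this
      exact ⟨a, ha, ha0, hmod, hfd ▸ hb, hfd ▸ fun hc => hab hc.symm⟩

-- ===== VERDICT (by name: the statement is the Claim_ definition above) =====
theorem is_product_of_two_spec : Claim_equal_is_product_of_two := by
  intro numbers target _
  unfold Spec_is_product_of_two is_product_of_two is_product_of_two_alt
  rw [Bool.eq_iff_iff]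
  rw [isProdLoopA_iff, isProdLoopB_iff _ _ (PySem.Set.nodup_ofList numbers)]
  exact exists_pair_iff _ _
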